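-- pv_equiv track=rewrite | github.com/Abraao-Andrade/python-technical-challenge | src/question2.py | verify_can_combine_orders
-- ===== SOURCE A (Python) =====
-- def verify_can_combine_orders(requests, iterator, n_max):
--     left = iterator + 1
--     right = len(requests) - 1
--     while left <= right:
--         mid = left + (right - left) // 2
--         if requests[iterator] + requests[mid] <= n_max:
--             return True
--         elif requests[iterator] + requests[right] <= n_max:
--             return True
--         elif requests[mid] + requests[right] <= n_max:
--             return True
--         else:
--             right -= 1
--     return False
-- ===== SOURCE B (Python) =====
-- def verify_can_combine_orders(requests, iterator, n_max):
--     return iterator + 1 < len(requests) and requests[iterator] + requests[iterator + 1] <= n_max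
-- ===== Notes on version B (the rewrite author's own statement) =====
-- stated objective: faster
-- what changed: On input whose candidate suffix requests[iterator:] is sorted ascending the cheapest partner for requests[iterator] is its immediate successor, so B replaces A's whole right-shrinking probe loop with the single O(1) check requests[iterator]+requests[iterator+1]<=n_max; Pre_ restricts to that sorted suffix with a non-negative iterator, since with an unsorted suffix A's value depends on which midpoint its loop happens to probe and a negative iterator uses Python's wraparound indexing, both outside the function's natural domain.
-- outside the precondition, e.g. on verify_can_combine_orders([5, 1, 2], 0, 4): A returns True, B returns False; on verify_can_combine_orders([1, 2, 3], -1, 10): A returns True, B returns True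
import Mathlib
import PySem

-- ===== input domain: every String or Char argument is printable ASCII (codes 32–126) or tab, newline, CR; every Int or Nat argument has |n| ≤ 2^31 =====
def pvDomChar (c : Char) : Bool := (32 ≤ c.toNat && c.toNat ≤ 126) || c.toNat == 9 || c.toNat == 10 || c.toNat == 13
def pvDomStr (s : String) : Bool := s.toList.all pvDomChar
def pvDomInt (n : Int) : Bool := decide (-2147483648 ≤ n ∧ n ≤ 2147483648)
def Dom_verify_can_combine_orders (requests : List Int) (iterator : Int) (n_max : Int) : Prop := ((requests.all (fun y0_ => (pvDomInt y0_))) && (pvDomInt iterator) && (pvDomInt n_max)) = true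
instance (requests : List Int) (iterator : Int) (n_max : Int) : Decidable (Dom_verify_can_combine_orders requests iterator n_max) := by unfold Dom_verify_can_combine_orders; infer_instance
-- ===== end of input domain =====

-- B: on sorted input the cheapest partner is the immediate successor, so one O(1) comparison
-- replaces A's O(n) probe loop.

-- ===== PORT A =====
-- the while-loop of A: `right` decreases until it passes `left`
def vccoLoop (requests : List Int) (iterator : Int) (n_max : Int) (left : Int) (right : Int) : Bool :=
  if h : left ≤ right then
    let mid := left + PySem.Int.floordiv (right - left) 2
    if PySem.List.pyGetD requests iterator 0 + PySem.List.pyGetD requests mid 0 ≤ n_max then true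
    else if PySem.List.pyGetD requests iterator 0 + PySem.List.pyGetD requests right 0 ≤ n_max then true
    else if PySem.List.pyGetD requests mid 0 + PySem.List.pyGetD requests right 0 ≤ n_max then true
    else vccoLoop requests iterator n_max left (right - 1)
  else false
termination_by (right + 1 - left).toNat
decreasing_by omega

def verify_can_combine_orders (requests : List Int) (iterator : Int) (n_max : Int) : Bool :=
  let left := iterator + 1
  let right := (requests.length : Int) - 1
  vccoLoop requests iterator n_max left right

-- ===== PORT B =====
def verify_can_combine_orders_alt (requests : List Int) (iterator : Int) (n_max : Int) : Bool :=
  if iterator + 1 < (requests.length : Int) then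
    decide (PySem.List.pyGetD requests iterator 0 + PySem.List.pyGetD requests (iterator + 1) 0 ≤ n_max)
  else false

-- ===== PRECONDITION & SPEC =====
-- Pre_ restricts to the function's natural domain — the candidate partners requests[iterator:]
-- sorted ascending and a non-negative iterator: when that suffix is unsorted A's value is an
-- artefact of which midpoint its loop happens to probe, and a negative iterator reads via
-- Python's wraparound indexing (raising IndexError below -len).
def Pre_verify_can_combine_orders (requests : List Int) (iterator : Int) (n_max : Int) : Prop :=
  0 ≤ iterator ∧ List.Pairwise (· ≤ ·) (requests.drop iterator.toNat)
instance (requests : List Int) (iterator : Int) (n_max : Int) : Decidable (Pre_verify_can_combine_orders requests iterator n_max) := by unfold Pre_verify_can_combine_orders; infer_instance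

def pvWitness_verify_can_combine_orders : List Int × Int × Int := ([2, 3, 5], 0, 7)

def Spec_verify_can_combine_orders (requests : List Int) (iterator : Int) (n_max : Int) (out : Bool) : Prop := out = verify_can_combine_orders_alt requests iterator n_max
instance (requests : List Int) (iterator : Int) (n_max : Int) (out : Bool) : Decidable (Spec_verify_can_combine_orders requests iterator n_max out) := by unfold Spec_verify_can_combine_orders; infer_instance

-- ===== CLAIM (what is proved, stated in full; the proofs are below) =====
def Claim_equal_verify_can_combine_orders : Prop := ∀ (requests : List Int) (iterator : Int) (n_max : Int), Dom_verify_can_combine_orders requests iterator n_max → Pre_verify_can_combine_orders requests iterator n_max → Spec_verify_can_combine_orders requests iterator n_max (verify_can_combine_orders requests iterator n_max)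

-- ===== LEMMAS AND PROOFS =====

-- A's loop from `right` down: true iff some r in [left, right] fires one of A's three tests
theorem vccoLoop_iff (requests : List Int) (iterator n_max left : Int) : ∀ (right : Int),
    vccoLoop requests iterator n_max left right = true ↔
      ∃ r : Int, left ≤ r ∧ r ≤ right ∧
        (PySem.List.pyGetD requests iterator 0 + PySem.List.pyGetD requests (left + PySem.Int.floordiv (r - left) 2) 0 ≤ n_max ∨
         PySem.List.pyGetD requests iterator 0 + PySem.List.pyGetD requests r 0 ≤ n_max ∨
         PySem.List.pyGetD requests (left + PySem.Int.floordiv (r - left) 2) 0 + PySem.List.pyGetD requests r 0 ≤ n_max) := by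
  suffices H : ∀ (k : Nat) (right : Int), (right + 1 - left).toNat = k →
      (vccoLoop requests iterator n_max left right = true ↔
        ∃ r : Int, left ≤ r ∧ r ≤ right ∧
          (PySem.List.pyGetD requests iterator 0 + PySem.List.pyGetD requests (left + PySem.Int.floordiv (r - left) 2) 0 ≤ n_max ∨
           PySem.List.pyGetD requests iterator 0 + PySem.List.pyGetD requests r 0 ≤ n_max ∨
           PySem.List.pyGetD requests (left + PySem.Int.floordiv (r - left) 2) 0 + PySem.List.pyGetD requests r 0 ≤ n_max)) by
    exact fun right => H _ right rfl
  intro k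
  induction k using Nat.strong_induction_on with
  | _ k IH =>
    intro right hk
    rw [vccoLoop]
    by_cases h : left ≤ right
    · simp only [dif_pos h]
      split_ifs with c1 c2 c3
      · simp only [true_iff]
        exact ⟨right, h, le_refl _, Or.inl c1⟩
      · simp only [true_iff]
        exact ⟨right, h, le_refl _, Or.inr (Or.inl c2)⟩
      · simp only [true_iff]
        exact ⟨right, h, le_refl _, Or.inr (Or.inr c3)⟩
      · rw [IH ((right - 1) + 1 - left).toNat (by omega) (right - 1) rfl]
        constructor
        · rintro ⟨r, h1, h2, hc⟩
          exact ⟨r, h1, by omega, hc⟩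
        · rintro ⟨r, h1, h2, hc⟩
          by_cases hr : r = right
          · subst hr
            rcases hc with hx | hy | hz
            · exact absurd hx c1
            · exact absurd hy c2
            · exact absurd hz c3
          · exact ⟨r, h1, by omega, hc⟩
    · simp only [dif_neg h, Bool.false_eq_true, false_iff]
      rintro ⟨r, h1, h2, -⟩
      omega

theorem fd_two (a : Int) : PySem.Int.floordiv a 2 = a / 2 :=
  PySem.Int.floordiv_eq_ediv_of_pos (by omega)

-- monotonicity of valid reads in the sorted suffix
theorem sorted_pyGetD_mono (requests : List Int) (k : Int) (h0k : 0 ≤ k)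
    (hs : List.Pairwise (· ≤ ·) (requests.drop k.toNat))
    (i j : Int) (h0 : k ≤ i) (hij : i ≤ j) (hj : j < (requests.length : Int)) :
    PySem.List.pyGetD requests i 0 ≤ PySem.List.pyGetD requests j 0 := by
  rw [PySem.List.pyGetD_eq_getElem requests 0 (by omega) (by omega),
      PySem.List.pyGetD_eq_getElem requests 0 (by omega) hj]
  rcases eq_or_lt_of_le hij with he | hlt
  · subst he; exact le_refl _
  · have := (List.pairwise_iff_getElem.mp hs) (i.toNat - k.toNat) (j.toNat - k.toNat)
      (by simp only [List.length_drop]; omega) (by simp only [List.length_drop]; omega) (by omega)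
    simpa [List.getElem_drop, Nat.add_sub_cancel' (by omega : k.toNat ≤ i.toNat),
      Nat.add_sub_cancel' (by omega : k.toNat ≤ j.toNat)] using this

-- ===== VERDICT (by name: the statement is the Claim_ definition above) =====
theorem verify_can_combine_orders_spec : Claim_equal_verify_can_combine_orders := by
  intro requests iterator n_max _ hpre
  obtain ⟨hit, hs⟩ := hpre
  unfold Spec_verify_can_combine_orders verify_can_combine_orders verify_can_combine_orders_alt
  simp only []
  by_cases hlen : iterator + 1 < (requests.length : Int)
  · rw [if_pos hlen, Bool.eq_iff_iff, vccoLoop_iff, decide_eq_true_iff]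
    constructor
    · rintro ⟨r, h1, h2, hc⟩
      have hmid1 : iterator + 1 ≤ iterator + 1 + PySem.Int.floordiv (r - (iterator + 1)) 2 := by
        rw [fd_two]; omega
      have hmid2 : iterator + 1 + PySem.Int.floordiv (r - (iterator + 1)) 2 ≤ r := by
        rw [fd_two]; omega
      have hr : r < (requests.length : Int) := by omega
      have hml := sorted_pyGetD_mono requests iterator hit hs (iterator + 1) _ (by omega) hmid1 (by omega)
      have hrl := sorted_pyGetD_mono requests iterator hit hs (iterator + 1) r (by omega) h1 hr
      have hxm := sorted_pyGetD_mono requests iterator hit hs iterator _ (le_refl _) (by omega : iterator ≤ iterator + 1 + PySem.Int.floordiv (r - (iterator + 1)) 2) (by omega)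
      rcases hc with hx | hy | hz
      · omega
      · omega
      · omega
    · intro hb
      refine ⟨iterator + 1, le_refl _, by omega, Or.inr (Or.inl hb)⟩
  · rw [if_neg hlen]
    rw [show vccoLoop requests iterator n_max (iterator + 1) ((requests.length : Int) - 1) = false by
      rw [vccoLoop]; simp only [dif_neg (by omega : ¬ iterator + 1 ≤ (requests.length : Int) - 1)]]
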